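-- pv_equiv track=rewrite | github.com/samarth3301/Soward-Prime-Leaked | prince/embed_creator.py | dec_to_hexa
-- ===== SOURCE A (Python) =====
-- conversion_table = {
--     0: "0",
--     1: "1",
--     2: "2",
--     3: "3",
--     4: "4",
--     5: "5",
--     6: "6",
--     7: "7",
--     8: "8",
--     9: "9",
--     10: "A",
--     11: "B",
--     12: "C",
--     13: "D",
--     14: "E",
--     15: "F",
-- }
--
-- def dec_to_hexa(decimal: int) -> str:
--     """
--     Convert a decimal number to hexadecimal
--     """
--     hexadecimal = ""
--     while decimal > 0:
--         remainder = decimal % 16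
--         hexadecimal = conversion_table[remainder] + hexadecimal
--         decimal = decimal // 16
--
--     if len(hexadecimal) < 6:
--         hexadecimal = "0" * (6 - len(hexadecimal)) + hexadecimal
--
--     return "#" + hexadecimal
-- ===== SOURCE B (Python) =====
-- def dec_to_hexa(decimal: int) -> str:
--     """
--     Convert a decimal number to hexadecimal
--     """
--     return "#{:06X}".format(max(decimal, 0))
-- ===== Notes on version B (the rewrite author's own statement) =====
-- stated objective: idiomatic
-- what changed: Replaces the manual divide-by-16 loop with a hand digit dictionary and manual zero-padding by a single format-spec closed form '#{:06X}'.format(max(decimal, 0)), where max reproduces the '#000000' result for non-positive inputs.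
import Mathlib
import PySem

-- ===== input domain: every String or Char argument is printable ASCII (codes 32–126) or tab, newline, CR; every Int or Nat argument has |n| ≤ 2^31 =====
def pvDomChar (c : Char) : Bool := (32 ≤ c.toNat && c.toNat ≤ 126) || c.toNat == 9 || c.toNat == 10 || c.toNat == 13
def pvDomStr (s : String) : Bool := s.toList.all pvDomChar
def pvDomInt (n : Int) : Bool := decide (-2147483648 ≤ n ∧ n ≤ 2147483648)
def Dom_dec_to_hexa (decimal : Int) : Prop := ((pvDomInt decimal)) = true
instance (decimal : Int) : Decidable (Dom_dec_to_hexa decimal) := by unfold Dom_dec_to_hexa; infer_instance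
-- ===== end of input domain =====

-- B replaces A's manual divide-by-16 loop, digit dictionary and manual zero-padding by the
-- format-spec closed form "#{:06X}".format(max(decimal, 0))  (objective: idiomatic).

-- ===== PORT A =====
def convTable : PySem.Dict Int String :=
  PySem.Dict.ofList [((0:Int),"0"),(1,"1"),(2,"2"),(3,"3"),(4,"4"),(5,"5"),(6,"6"),(7,"7"),
                     (8,"8"),(9,"9"),(10,"A"),(11,"B"),(12,"C"),(13,"D"),(14,"E"),(15,"F")]

-- the while loop of A; conversion_table[remainder] always hits (0 ≤ remainder < 16), ported via getD
def aLoop (decimal : Int) (hexadecimal : List Char) : List Char :=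
  if h : decimal > 0 then
    aLoop (PySem.Int.floordiv decimal 16)
      ((convTable.getD (PySem.Int.mod decimal 16) "").toList ++ hexadecimal)
  else hexadecimal
termination_by decimal.toNat
decreasing_by
  rw [PySem.Int.floordiv_eq_ediv_of_pos (by norm_num : (0:Int) < 16)]
  omega

def dec_to_hexa (decimal : Int) : String :=
  let hexadecimal := aLoop decimal []
  String.mk ('#' ::
    (if hexadecimal.length < 6
     then List.replicate (6 - hexadecimal.length) '0' ++ hexadecimal
     else hexadecimal))

-- ===== PORT B =====
-- hand port of CPython's "{:06X}" formatting for a nonnegative int: uppercase hex digits,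
-- left zero-pad to width 6 (exact for every nonnegative int, which is all B feeds it)
def hexDigitU (k : Nat) : Char := if k < 10 then Char.ofNat (48 + k) else Char.ofNat (55 + k)

def toHexU : Nat → List Char
  | 0 => []
  | n+1 => toHexU ((n+1)/16) ++ [hexDigitU ((n+1)%16)]

def dec_to_hexa_alt (decimal : Int) : String :=
  let digits := toHexU (max decimal 0).toNat
  String.mk ('#' :: (List.replicate (6 - digits.length) '0' ++ digits))

-- ===== PRECONDITION & SPEC =====
def Spec_dec_to_hexa (decimal : Int) (out : String) : Prop := out = dec_to_hexa_alt decimal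
instance (decimal : Int) (out : String) : Decidable (Spec_dec_to_hexa decimal out) := by unfold Spec_dec_to_hexa; infer_instance

-- ===== CLAIM (what is proved, stated in full; the proofs are below) =====
def Claim_equal_dec_to_hexa : Prop := ∀ (decimal : Int), Dom_dec_to_hexa decimal → Spec_dec_to_hexa decimal (dec_to_hexa decimal)

-- ===== LEMMAS AND PROOFS =====

lemma convTable_lookup (r : Nat) (hr : r < 16) :
    (convTable.getD ((r : Nat) : Int) "").toList = [hexDigitU r] := by
  interval_cases r <;> decide

lemma toHexU_pos (m : Nat) (h : 0 < m) :
    toHexU m = toHexU (m / 16) ++ [hexDigitU (m % 16)] := by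
  cases m with
  | zero => omega
  | succ k => rw [toHexU]

lemma aLoop_eq : ∀ (n : Nat) (d : Int), d.toNat ≤ n → ∀ acc, aLoop d acc = toHexU d.toNat ++ acc := by
  intro n
  induction n with
  | zero =>
    intro d hd acc
    rw [aLoop]
    have h0 : ¬ d > 0 := by omega
    have h1 : d.toNat = 0 := by omega
    simp [h0, h1, toHexU]
  | succ n ih =>
    intro d hd acc
    rw [aLoop]
    by_cases h : d > 0
    · simp only [h, dif_pos]
      have hdiv : PySem.Int.floordiv d 16 = d / 16 :=
        PySem.Int.floordiv_eq_ediv_of_pos (by norm_num)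
      have hmod : PySem.Int.mod d 16 = d % 16 :=
        PySem.Int.mod_eq_emod_of_pos (by norm_num)
      have hmodcast : d % 16 = ((d.toNat % 16 : Nat) : Int) := by omega
      have hdivtoNat : (d / 16).toNat = d.toNat / 16 := by omega
      have hle : (d / 16).toNat ≤ n := by omega
      rw [hdiv, hmod, hmodcast, convTable_lookup _ (by omega),
          ih (d / 16) hle, hdivtoNat, toHexU_pos d.toNat (by omega)]
      simp
    · simp only [h, dif_neg, not_false_iff]
      have h1 : d.toNat = 0 := by omega
      simp [h1, toHexU]

-- ===== VERDICT (by name: the statement is the Claim_ definition above) =====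
theorem dec_to_hexa_spec : Claim_equal_dec_to_hexa := by
  intro d _
  unfold Spec_dec_to_hexa dec_to_hexa dec_to_hexa_alt
  have h1 : aLoop d [] = toHexU d.toNat := by
    simpa using aLoop_eq d.toNat d le_rfl []
  have h2 : (max d 0).toNat = d.toNat := by omega
  simp only [h1, h2]
  split_ifs with h
  · rfl
  · have h0 : 6 - (toHexU d.toNat).length = 0 := by omega
    rw [h0]
    rfl
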